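-- pv_equiv track=rewrite | github.com/weiminn/IS706-Project | RF/code/libraryUpdatePy/empiricalData/GT_A.py | isContainV1
-- ===== SOURCE A (Python) =====
-- def isContainV1(lines):
--     gt = [
--         "newInputStreamSupplier",
--         "newInputStreamSupplier",
--         "newReaderSupplier",
--         "newOutputStreamSupplier",
--         "newInputStreamSupplier",
--         "setThreadPool",
--         "setSoftMinEvictableIdleTimeMillis",
--         "setMinEvictableIdleTimeMillis",
--         "setMaxIdle",
--         "setTimeBetweenEvictionRunsMillis",
--         "setNumTestsPerEvictionRun",
--         "setTestWhileIdle",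
--         "setTestOnBorrow",
--         "setMaxActive",
--         "setMaxWait",
--         "setTestOnReturn",
--         "setWhenExhaustedAction",
--         "setMinIdle",
--         "socketAddress",
--         "build",
--         "trustManager",
--         "forClient",
--         "put",
--         "addAccept",
--         "iterator",
--         "getDocument",
--         "floatToPrefixCoded",
--         "doubleToPrefixCoded",
--         "maxDoc",
--         "setIntValue",
--         "setLongValue",
--         "setDoubleValue",
--         "setFloatValue",
--         "getFieldable",
--         "size",
--         "get",
--         "setFilter",
--         "hits",
--         "failed",
--         "lat",
--         "distance",
--         "gte",
--         "bottomRight",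
--         "gt",
--         "settingsBuilder",
--         "topLeft",
--         "setIgnoreConflicts",
--         "lt",
--         "add",
--         "add",
--         "lte",
--         "lon",
--         "getType",
--         "getId",
--         "nodeBuilder",
--         "settings",
--         "isCreated",
--         "getIndex",
--         "getIndex",
--         "isFound",
--         "getType",
--         "setExtraSource",
--         "getId",
--         "setRefresh",
--         "settingsBuilder",
--         "hits",
--         "nodeBuilder",
--         "loadConfigSettings",
--         "settings",
--         "admin",
--         "setFilter",
--         "order",
--         "failed",
--         "settingsBuilder"]
--     res = []
--     for line in lines:
--         isIn = False
--         for g in gt: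
--             if g in line:
--                 isIn = True
--                 break
--         if isIn:
--             res.append(line)
--     return res
-- ===== SOURCE B (Python) =====
-- # B: position-major multi-pattern scan over a compact pattern table — the distinct
-- # patterns are kept as one space-joined string split once, and each line is walked
-- # a single time by start position testing startswith, instead of A's pattern-major
-- # loop running an independent full substring search per pattern.
-- _PATS = ("newInputStreamSupplier newReaderSupplier newOutputStreamSupplier"
--          " setThreadPool setSoftMinEvictableIdleTimeMillis"
--          " setMinEvictableIdleTimeMillis setMaxIdle"
--          " setTimeBetweenEvictionRunsMillis setNumTestsPerEvictionRun"
--          " setTestWhileIdle setTestOnBorrow setMaxActive setMaxWait"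
--          " setTestOnReturn setWhenExhaustedAction setMinIdle socketAddress"
--          " build trustManager forClient put addAccept iterator getDocument"
--          " floatToPrefixCoded doubleToPrefixCoded maxDoc setIntValue"
--          " setLongValue setDoubleValue setFloatValue getFieldable size get"
--          " setFilter hits failed lat distance gte bottomRight gt"
--          " settingsBuilder topLeft setIgnoreConflicts lt add lte lon getType"
--          " getId nodeBuilder settings isCreated getIndex isFound"
--          " setExtraSource setRefresh loadConfigSettings admin order").split(" ")
--
--
-- def _hit(line):
--     for j in range(len(line)):
--         for p in _PATS:
--             if line.startswith(p, j):
--                 return True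
--     return False
--
--
-- def isContainV1(lines):
--     return [line for line in lines if _hit(line)]
-- ===== Notes on version B (the rewrite author's own statement) =====
-- stated objective: alternative
-- what changed: A loops over all 74 patterns per line running an independent full substring search for each with an early break; B keeps the 61 distinct patterns as one compact space-joined table split once, then walks each line a single time by start position and tests startswith for the distinct patterns at that position.
import Mathlib
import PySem

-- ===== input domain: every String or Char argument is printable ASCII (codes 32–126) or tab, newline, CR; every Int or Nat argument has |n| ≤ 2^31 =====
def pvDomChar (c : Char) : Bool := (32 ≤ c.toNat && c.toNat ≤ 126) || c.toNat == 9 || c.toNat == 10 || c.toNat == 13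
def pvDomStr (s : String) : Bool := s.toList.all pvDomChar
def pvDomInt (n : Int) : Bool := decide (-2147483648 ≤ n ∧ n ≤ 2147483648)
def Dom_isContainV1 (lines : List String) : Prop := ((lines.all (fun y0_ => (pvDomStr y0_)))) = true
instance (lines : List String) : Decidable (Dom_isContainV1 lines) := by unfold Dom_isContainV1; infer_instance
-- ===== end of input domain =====

-- ===== PORT A =====
-- B changes only how each line is tested (one position-major scan over a compact
-- pattern table instead of a per-pattern substring search); return value proved equal.
-- A's fixed pattern list `gt` (with its duplicates)
def gtPatterns : List String := [
  "newInputStreamSupplier",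
  "newInputStreamSupplier",
  "newReaderSupplier",
  "newOutputStreamSupplier",
  "newInputStreamSupplier",
  "setThreadPool",
  "setSoftMinEvictableIdleTimeMillis",
  "setMinEvictableIdleTimeMillis",
  "setMaxIdle",
  "setTimeBetweenEvictionRunsMillis",
  "setNumTestsPerEvictionRun",
  "setTestWhileIdle",
  "setTestOnBorrow",
  "setMaxActive",
  "setMaxWait",
  "setTestOnReturn",
  "setWhenExhaustedAction",
  "setMinIdle",
  "socketAddress",
  "build",
  "trustManager",
  "forClient",
  "put",
  "addAccept",
  "iterator",
  "getDocument",
  "floatToPrefixCoded",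
  "doubleToPrefixCoded",
  "maxDoc",
  "setIntValue",
  "setLongValue",
  "setDoubleValue",
  "setFloatValue",
  "getFieldable",
  "size",
  "get",
  "setFilter",
  "hits",
  "failed",
  "lat",
  "distance",
  "gte",
  "bottomRight",
  "gt",
  "settingsBuilder",
  "topLeft",
  "setIgnoreConflicts",
  "lt",
  "add",
  "add",
  "lte",
  "lon",
  "getType",
  "getId",
  "nodeBuilder",
  "settings",
  "isCreated",
  "getIndex",
  "getIndex",
  "isFound",
  "getType",
  "setExtraSource",
  "getId",
  "setRefresh",
  "settingsBuilder",
  "hits",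
  "nodeBuilder",
  "loadConfigSettings",
  "settings",
  "admin",
  "setFilter",
  "order",
  "failed",
  "settingsBuilder"
]

-- A's inner loop: `for g in gt: if g in line: isIn = True; break`
def anyInA : List String → String → Bool
  | [], _ => false
  | g :: rest, line => if PySem.Str.isIn g line then true else anyInA rest line

def isContainV1 (lines : List String) : List String :=
  lines.foldl (fun res line => if anyInA gtPatterns line then res ++ [line] else res) []

-- ===== PORT B =====
-- _PATS: the distinct patterns kept as one space-joined string, split once
def patsB : List String := (PySem.Str.split? ("newInputStreamSupplier newReaderSupplier newOutputStreamSupplier setThreadPool setSoftMinEvictableIdleTimeMillis setMinEvictableIdleTimeMillis setMaxIdle setTimeBetweenEvictionRunsMillis setNumTestsPerEvictionRun setTestWhileIdle setTestOnBorrow setMaxActive setMaxWait setTestOnReturn setWhenExhaustedAction setMinIdle socketAddress build trustManager forClient put addAccept iterator getDocument floatToPrefixCoded doubleToPrefixCoded maxDoc setIntValue setLongValue setDoubleValue setFloatValue getFieldable size get setFilter hits failed lat distance gte bottomRight gt settingsBuilder topLeft setIgnoreConflicts lt add lte lon getType getId nodeBuilder settings isCreated getIndex isFound setExtraSource setRefresh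 loadConfigSettings admin order") " ").getD []

-- _hit: `for j in range(len(line)): for p in _PATS: if line.startswith(p, j): return True`
-- ported by structural recursion on the suffix starting at position j
def hitB : List Char → Bool
  | [] => false
  | c :: rest => patsB.any (fun p => PySem.Chars.startswith (c :: rest) p.toList) || hitB rest

def isContainV1_alt (lines : List String) : List String :=
  lines.filter (fun line => hitB line.toList)

-- ===== PRECONDITION & SPEC =====
def Spec_isContainV1 (lines : List String) (out : List String) : Prop := out = isContainV1_alt lines
instance (lines : List String) (out : List String) : Decidable (Spec_isContainV1 lines out) := by unfold Spec_isContainV1; infer_instance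

-- ===== CLAIM =====
def Claim_equal_isContainV1 : Prop := ∀ (lines : List String), Dom_isContainV1 lines → Spec_isContainV1 lines (isContainV1 lines)

-- ===== LEMMAS AND PROOFS =====

set_option maxRecDepth 1000000 in
set_option maxHeartbeats 1000000 in
theorem patsB_eq : patsB = ["newInputStreamSupplier", "newReaderSupplier", "newOutputStreamSupplier", "setThreadPool", "setSoftMinEvictableIdleTimeMillis", "setMinEvictableIdleTimeMillis", "setMaxIdle", "setTimeBetweenEvictionRunsMillis", "setNumTestsPerEvictionRun", "setTestWhileIdle", "setTestOnBorrow", "setMaxActive", "setMaxWait", "setTestOnReturn", "setWhenExhaustedAction", "setMinIdle", "socketAddress", "build", "trustManager", "forClient", "put", "addAccept", "iterator", "getDocument", "floatToPrefixCoded", "doubleToPrefixCoded", "maxDoc", "setIntValue", "setLongValue", "setDoubleValue", "setFloatValue", "getFieldable", "size", "get", "setFilter", "hits", "failed", "lat", "distance", "gte", "bottomRight", "gt", "settingsBuilder", "topLeft", "setIgnoreConflicts", "lt", "add", "lte", "lon", "getType", "getId", "nodeBuilder", "settings", "isCreated", "getIndex", "isFound", "setExtraSource", "setRefresh", "loadConfigSettings",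 "admin", "order"] := by rfl

set_option maxRecDepth 100000 in
theorem pats_sub : ∀ p ∈ patsB, p ∈ gtPatterns := by simp only [patsB_eq]; decide

set_option maxRecDepth 100000 in
theorem gt_sub : ∀ g ∈ gtPatterns, g ∈ patsB := by simp only [patsB_eq]; decide

set_option maxRecDepth 100000 in
theorem patsB_ne_nil : ∀ p ∈ patsB, p.toList ≠ [] := by simp only [patsB_eq]; decide

theorem anyInA_iff (gs : List String) (line : String) :
    anyInA gs line = true ↔ ∃ g ∈ gs, PySem.Str.isIn g line = true := by
  induction gs with
  | nil => simp [anyInA]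
  | cons g rest ih =>
      simp only [anyInA]
      split_ifs with h
      · simp only [true_iff]
        exact ⟨g, List.mem_cons_self .., h⟩
      · rw [ih]
        constructor
        · rintro ⟨x, hx, hxin⟩; exact ⟨x, List.mem_cons_of_mem _ hx, hxin⟩
        · rintro ⟨x, hx, hxin⟩
          rcases List.mem_cons.mp hx with rfl | hx
          · exact absurd hxin h
          · exact ⟨x, hx, hxin⟩

theorem hitB_iff (s : List Char) :
    hitB s = true ↔ ∃ p ∈ patsB, ∃ j, p.toList <+: s.drop j := by
  induction s with
  | nil =>
      simp only [hitB, List.drop_nil, List.prefix_nil]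
      constructor
      · intro h; cases h
      · rintro ⟨p, hp, _, h⟩; exact absurd h (patsB_ne_nil _ hp)
  | cons c rest ih =>
      simp only [hitB, Bool.or_eq_true, List.any_eq_true, ih]
      constructor
      · rintro (⟨p, hp, hsw⟩ | ⟨p, hp, j, hpre⟩)
        · exact ⟨p, hp, 0, (PySem.Chars.startswith_iff _ _).mp hsw⟩
        · exact ⟨p, hp, j + 1, by simpa using hpre⟩
      · rintro ⟨p, hp, j, hpre⟩
        cases j with
        | zero => exact Or.inl ⟨p, hp, (PySem.Chars.startswith_iff _ _).mpr (by simpa using hpre)⟩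
        | succ k => exact Or.inr ⟨p, hp, k, by simpa using hpre⟩

theorem line_eq (line : String) : anyInA gtPatterns line = hitB line.toList := by
  rw [Bool.eq_iff_iff, anyInA_iff, hitB_iff]
  constructor
  · rintro ⟨g, hg, hin⟩
    rw [PySem.Str.isIn_eq] at hin
    obtain ⟨j, hj⟩ := (PySem.Chars.exists_prefix_drop_iff_isIn _ _).mpr hin
    exact ⟨g, gt_sub g hg, j, hj⟩
  · rintro ⟨p, hp, j, hj⟩
    refine ⟨p, pats_sub p hp, ?_⟩
    rw [PySem.Str.isIn_eq]
    exact (PySem.Chars.exists_prefix_drop_iff_isIn _ _).mp ⟨j, hj⟩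

-- ===== VERDICT =====
theorem isContainV1_spec : Claim_equal_isContainV1 := by
  intro lines _
  show isContainV1 lines = isContainV1_alt lines
  unfold isContainV1 isContainV1_alt
  rw [show (fun (res : List String) line => if anyInA gtPatterns line = true then res ++ [line] else res)
        = (fun res line => if anyInA gtPatterns line = true then res ++ [id line] else res) from rfl,
      PySem.List.foldl_append_if]
  simp only [List.map_id, List.nil_append]
  exact List.filter_congr (fun line _ => line_eq line)
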